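-- pv_equiv track=rewrite | github.com/tobyew/USACO-Projects | USACO Prime Cryptarithm/main.py | findPossibilities
-- ===== SOURCE A (Python) =====
-- def findPossibilities(nums):
-- 	possibilities = []
-- 	for a in nums:
-- 		for b in nums:
-- 			for c in nums:
-- 				for d in nums:
-- 					for e in nums:
-- 						possibilities.append([a,b,c,d,e])
-- 	return possibilities
-- ===== SOURCE B (Python) =====
-- def findPossibilities(nums):
--     result = [[]]
--     for _ in range(5):
--         result = [prefix + [x] for prefix in result for x in nums]
--     return result
-- ===== Notes on version B (the rewrite author's own statement) =====
-- stated objective: simpler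
-- what changed: Replaces five hardcoded nested loops with a single loop over the 5 positions that extends a frontier of partial tuples by one element each round.
import Mathlib
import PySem

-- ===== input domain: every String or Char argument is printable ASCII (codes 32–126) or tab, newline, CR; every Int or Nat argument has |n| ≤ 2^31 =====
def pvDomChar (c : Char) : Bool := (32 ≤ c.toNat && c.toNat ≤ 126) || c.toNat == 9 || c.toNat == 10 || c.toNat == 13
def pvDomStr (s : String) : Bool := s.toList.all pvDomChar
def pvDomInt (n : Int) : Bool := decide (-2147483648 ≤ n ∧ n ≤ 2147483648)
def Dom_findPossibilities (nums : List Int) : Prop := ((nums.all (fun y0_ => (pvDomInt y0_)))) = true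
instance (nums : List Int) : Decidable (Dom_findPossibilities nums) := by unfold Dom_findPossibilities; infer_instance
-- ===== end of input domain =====

-- B replaces A's five hardcoded nested loops by one loop over the 5 positions that
-- extends a frontier of partial tuples; objective: simpler (same asymptotic cost).

-- ===== PORT A =====
-- five nested 'for … in nums' loops, each appending [a,b,c,d,e] to the accumulator
def findPossibilities (nums : List Int) : List (List Int) :=
  nums.foldl (fun acc a =>
    nums.foldl (fun acc b =>
      nums.foldl (fun acc c =>
        nums.foldl (fun acc d =>
          nums.foldl (fun acc e => acc ++ [[a, b, c, d, e]]) acc) acc) acc) acc) []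

-- ===== PORT B =====
-- result = [[]]; for _ in range(5): result = [prefix + [x] for prefix in result for x in nums]
def findPossibilities_alt (nums : List Int) : List (List Int) :=
  (PySem.List.pyRange 0 5 1).foldl
    (fun result _ => result.flatMap (fun prefix_ => nums.map (fun x => prefix_ ++ [x])))
    [[]]

-- ===== PRECONDITION & SPEC =====
def Spec_findPossibilities (nums : List Int) (out : List (List Int)) : Prop := out = findPossibilities_alt nums
instance (nums : List Int) (out : List (List Int)) : Decidable (Spec_findPossibilities nums out) := by unfold Spec_findPossibilities; infer_instance

-- ===== CLAIM (what is proved, stated in full; the proofs are below) =====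
def Claim_equal_findPossibilities : Prop := ∀ (nums : List Int), Dom_findPossibilities nums → Spec_findPossibilities nums (findPossibilities nums)

-- ===== LEMMAS AND PROOFS =====

-- ===== VERDICT (by name: the statement is the Claim_ definition above) =====
theorem findPossibilities_spec : Claim_equal_findPossibilities := by
  intro nums _
  unfold Spec_findPossibilities
  have h5 : PySem.List.pyRange 0 5 1 = [0, 1, 2, 3, 4] := by decide
  simp [findPossibilities, findPossibilities_alt, h5,
    ← List.flatMap_def,
    List.flatMap_map, List.flatMap_assoc, ← List.map_eq_flatMap]
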